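-- pv_equiv track=rewrite | github.com/InfiniteLoop360/GFG_POTD | Group Balls by Sequence.py | validgroup
-- ===== SOURCE A (Python) =====
-- from collections import Counter
--
-- def validgroup(arr, k):
--     if len(arr) % k != 0:
--         return False
--
--     count = Counter(arr)
--     sorted_keys = sorted(count)
--
--     for num in sorted_keys:
--         freq = count[num]
--         if freq > 0:
--             for i in range(num, num + k):
--                 if count[i] < freq:
--                     return False
--                 count[i] -= freq
--     return True
-- ===== SOURCE B (Python) =====
-- from collections import Counter, deque
--
-- def validgroup(arr, k):
--     if len(arr) % k != 0:
--         return False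
--     count = Counter(arr)
--     opened = 0          # sequences currently open (still expecting the next value)
--     last = None         # previous distinct value processed
--     starts = deque()    # how many sequences began at each of the last values
--     for num in sorted(count):
--         c = count[num]
--         if opened > 0 and num != last + 1:
--             return False
--         if c < opened:
--             return False
--         if opened == 0:
--             starts.clear()
--         starts.append(c - opened)
--         opened = c
--         if len(starts) == k:
--             opened -= starts.popleft()
--         last = num
--     return opened == 0
-- ===== Notes on version B (the rewrite author's own statement) =====
-- stated objective: alternative
-- what changed: A repeatedly subtracts each value's frequency from a Counter across a k-wide window (re-scanning k entries per distinct value); B makes one sweep over the sorted distinct values, tracking the number of currently open sequences and a sliding deque of how many sequences started at each recent value, so no counter entry is ever revisited.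
-- intended difference: For k < 0 with a nonempty array whose length % k == 0, A returns True because its inner range(num, num+k) is empty and nothing is ever checked, while B returns False, the intended answer: a nonempty array cannot be partitioned into consecutive groups of negative size. — e.g. on validgroup([1], -1): A returns true, B returns false
import Mathlib
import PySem

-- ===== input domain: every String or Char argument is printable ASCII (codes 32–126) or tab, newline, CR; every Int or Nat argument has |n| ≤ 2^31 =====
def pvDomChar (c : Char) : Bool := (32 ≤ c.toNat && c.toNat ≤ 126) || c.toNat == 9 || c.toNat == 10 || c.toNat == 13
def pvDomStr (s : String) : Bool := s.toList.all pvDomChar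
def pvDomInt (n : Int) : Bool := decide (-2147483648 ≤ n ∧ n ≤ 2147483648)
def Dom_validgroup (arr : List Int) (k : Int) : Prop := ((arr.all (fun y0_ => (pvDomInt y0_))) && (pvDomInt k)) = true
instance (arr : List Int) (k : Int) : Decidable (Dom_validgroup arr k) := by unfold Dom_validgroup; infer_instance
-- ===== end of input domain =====

-- B replaces A's per-key window of counter subtractions by a single left-to-right sweep over the
-- sorted distinct values that tracks the number of open sequences and a sliding window of starts.

-- ===== PORT A =====
-- inner 'for i in range(num, num+k)': none = the 'return False' branch
def validgroupAWin (freq : Int) : List Int → PySem.Dict Int Int → Option (PySem.Dict Int Int)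
  | [], d => some d
  | i :: rest, d =>
      if d.getD i 0 < freq then none
      else validgroupAWin freq rest (d.modify i 0 (fun x => x - freq))

def validgroupALoop (k : Int) : List Int → PySem.Dict Int Int → Bool
  | [], _ => true
  | num :: rest, d =>
      let freq := d.getD num 0
      if freq > 0 then
        match validgroupAWin freq (PySem.List.pyRange num (num + k) 1) d with
        | none => false
        | some d' => validgroupALoop k rest d'
      else validgroupALoop k rest d

def validgroup (arr : List Int) (k : Int) : Bool :=
  if PySem.Int.mod (arr.length : Int) k ≠ 0 then false
  else
    validgroupALoop k
      (PySem.List.sorted (PySem.Dict.counter arr).keys (fun x => x) false)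
      (PySem.Dict.counter arr)

-- ===== PORT B =====
-- Python's 'last' starts as None but is only read under 'opened > 0', which implies it was
-- assigned; the initial 0 here is never read.
def validgroupBLoop (k : Int) (cnt : PySem.Dict Int Int) :
    List Int → Int → Int → List Int → Bool
  | [], opened, _, _ => opened == 0
  | num :: rest, opened, last, starts =>
      let c := cnt.getD num 0
      if opened > 0 && num != last + 1 then false
      else if c < opened then false
      else
        let starts1 := if opened == 0 then [] else starts
        let starts2 := starts1 ++ [c - opened]
        if (starts2.length : Int) == k then
          validgroupBLoop k cnt rest (c - starts2.headI) num starts2.tail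
        else
          validgroupBLoop k cnt rest c num starts2

def validgroup_alt (arr : List Int) (k : Int) : Bool :=
  if PySem.Int.mod (arr.length : Int) k ≠ 0 then false
  else
    validgroupBLoop k (PySem.Dict.counter arr)
      (PySem.List.sorted (PySem.Dict.counter arr).keys (fun x => x) false)
      0 0 []

-- ===== PRECONDITION & SPEC =====
-- Pre_ excludes exactly k = 0, where both Pythons raise ZeroDivisionError on 'len(arr) % k'.
def Pre_validgroup (arr : List Int) (k : Int) : Prop := k ≠ 0
instance (arr : List Int) (k : Int) : Decidable (Pre_validgroup arr k) := by
  unfold Pre_validgroup; infer_instance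

def pvWitness_validgroup : List Int × Int := ([1, 1, 2, 2, 3, 3], 3)

-- On negative k with a nonempty array whose length k divides, A returns True (its inner
-- range(num, num+k) is empty so it never checks anything), while B returns False, the intended
-- answer: a nonempty array cannot be split into consecutive groups of negative size.
def D_validgroup (arr : List Int) (k : Int) : Prop :=
  k < 0 ∧ arr ≠ [] ∧ PySem.Int.mod (arr.length : Int) k = 0
instance (arr : List Int) (k : Int) : Decidable (D_validgroup arr k) := by
  unfold D_validgroup; infer_instance

def Spec_validgroup (arr : List Int) (k : Int) (out : Bool) : Prop :=
  ¬ D_validgroup arr k → out = validgroup_alt arr k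
instance (arr : List Int) (k : Int) (out : Bool) : Decidable (Spec_validgroup arr k out) := by
  unfold Spec_validgroup; infer_instance

def pvDiffWitness_validgroup : List Int × Int := ([1], -1)
def pvDiffWitnessOut_validgroup : Bool × Bool := (true, false)

-- ===== CLAIM (what is proved, stated in full; the proofs are below) =====
def Claim_unchanged_validgroup : Prop := ∀ (arr : List Int) (k : Int), Dom_validgroup arr k → Pre_validgroup arr k → Spec_validgroup arr k (validgroup arr k)
def Claim_changed_validgroup : Prop := Dom_validgroup (pvDiffWitness_validgroup.1) (pvDiffWitness_validgroup.2) ∧ Pre_validgroup (pvDiffWitness_validgroup.1) (pvDiffWitness_validgroup.2) ∧ D_validgroup (pvDiffWitness_validgroup.1) (pvDiffWitness_validgroup.2) ∧ validgroup (pvDiffWitness_validgroup.1) (pvDiffWitness_validgroup.2) = pvDiffWitnessOut_validgroup.1 ∧ validgroup_alt (pvDiffWitness_validgroup.1) (pvDiffWitness_validgroup.2) = pvDiffWitnessOut_validgroup.2 ∧ pvDiffWitnessOut_validgroup.1 ≠ pvDiffWitnessOut_validgroup.2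
def Claim_exact_validgroup : Prop := ∀ (arr : List Int) (k : Int), Dom_validgroup arr k → Pre_validgroup arr k → D_validgroup arr k → validgroup arr k ≠ validgroup_alt arr k

-- ===== LEMMAS AND PROOFS =====

-- pvCover k last starts i = number of sequences recorded in B's sliding window that cover value i:
-- the entry at distance t from the END of starts began at value last - t.
def pvCover (k last : Int) : List Int → Int → Int
  | [], _ => 0
  | s :: rest, i => (if i < (last - (rest.length : Int)) + k then s else 0) + pvCover k last rest i

lemma pvCover_nonneg (k last : Int) (starts : List Int) (h : ∀ x ∈ starts, 0 ≤ x) (i : Int) :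
    0 ≤ pvCover k last starts i := by
  induction starts with
  | nil => simp [pvCover]
  | cons s rest ih =>
      simp only [pvCover]
      have hs : 0 ≤ s := h s (by simp)
      have := ih (fun x hx => h x (by simp [hx]))
      split <;> omega

lemma pvCover_le_sum (k last : Int) (starts : List Int) (h : ∀ x ∈ starts, 0 ≤ x) (i : Int) :
    pvCover k last starts i ≤ starts.sum := by
  induction starts with
  | nil => simp [pvCover]
  | cons s rest ih =>
      simp only [pvCover, List.sum_cons]
      have hs : 0 ≤ s := h s (by simp)
      have := ih (fun x hx => h x (by simp [hx]))
      split <;> omega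

lemma pvCover_eq_sum (k last : Int) (starts : List Int) (i : Int)
    (hi : i ≤ last - (starts.length : Int) + k) :
    pvCover k last starts i = starts.sum := by
  induction starts with
  | nil => simp [pvCover]
  | cons s rest ih =>
      simp only [pvCover, List.sum_cons, List.length_cons] at *
      have h1 : i < (last - (rest.length : Int)) + k := by push_cast at hi ⊢; omega
      rw [if_pos h1, ih (by push_cast at hi ⊢; omega)]

lemma pvCover_append (k last s i : Int) (xs : List Int) :
    pvCover k (last + 1) (xs ++ [s]) i
      = pvCover k last xs i + (if i < (last + 1) + k then s else 0) := by
  induction xs with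
  | nil => simp [pvCover]
  | cons x t ih =>
      simp only [List.cons_append, pvCover, List.length_append, List.length_cons,
        List.length_nil] at *
      have hw : (last + 1 - ((t.length + (0 + 1) : Nat) : Int)) = last - (t.length : Int) := by
        push_cast; ring
      rw [hw, ih]
      ring

-- The one-step evolution of B's window, seen through pvCover, for positions beyond the new key.
lemma pvCover_step (k last num s : Int) (starts : List Int)
    (hent : ∀ x ∈ starts, 0 ≤ x) (hlen : (starts.length : Int) < k)
    (hcase : num = last + 1 ∨ starts.sum = 0) (i : Int) (hi : num < i) :
    pvCover k num
        (let s2 := (if starts.sum == 0 then ([] : List Int) else starts) ++ [s];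
         if (s2.length : Int) == k then s2.tail else s2) i
      = pvCover k last starts i + (if i < num + k then s else 0) := by
  by_cases hz : starts.sum = 0
  · have hold : pvCover k last starts i = 0 := by
      have h1 := pvCover_nonneg k last starts hent i
      have h2 := pvCover_le_sum k last starts hent i
      omega
    simp only [hz, beq_self_eq_true, if_true, List.nil_append, hold, zero_add]
    by_cases hk1 : ((([s] : List Int).length : Int) = k)
    · simp only [List.length_cons, List.length_nil] at hk1
      have : ((([s] : List Int).length : Int) == k) = true := by
        simp [List.length_cons]; omega
      simp only [this, if_true, List.tail_cons, pvCover]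
      have : ¬ i < num + k := by omega
      simp [this]
    · have hb : ((([s] : List Int).length : Int) == k) = false :=
        beq_eq_false_iff_ne.mpr hk1
      simp only [hb, Bool.false_eq_true, if_false, pvCover, List.length_nil]
      norm_num
  · have hnum : num = last + 1 := by
      rcases hcase with h | h
      · exact h
      · exact absurd h hz
    have hzb : (starts.sum == 0) = false := beq_eq_false_iff_ne.mpr hz
    simp only [hzb, Bool.false_eq_true, if_false]
    subst hnum
    by_cases hpop : (((starts ++ [s]).length : Int) = k)
    · have hb : (((starts ++ [s]).length : Int) == k) = true := beq_iff_eq.mpr hpop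
      simp only [hb, if_true]
      obtain ⟨s0, t, rfl⟩ : ∃ s0 t, starts = s0 :: t := by
        cases starts with
        | nil => simp at hz
        | cons a b => exact ⟨a, b, rfl⟩
      simp only [List.cons_append, List.tail_cons]
      have hlen2 : ((t ++ [s]).length : Int) = k - 1 := by
        simp only [List.cons_append, List.length_cons, List.length_append,
          List.length_nil] at hpop ⊢
        push_cast at hpop ⊢; omega
      have htl : pvCover k (last + 1) (s0 :: (t ++ [s])) i
          = pvCover k (last + 1) (t ++ [s]) i := by
        simp only [pvCover]
        have hc : ¬ i < (last + 1 - ((t ++ [s]).length : Int)) + k := by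
          rw [hlen2]; omega
        rw [if_neg hc]; ring
      rw [← htl, show s0 :: (t ++ [s]) = (s0 :: t) ++ [s] from rfl, pvCover_append]
    · have hb : (((starts ++ [s]).length : Int) == k) = false :=
        beq_eq_false_iff_ne.mpr hpop
      simp only [hb, Bool.false_eq_true, if_false]
      rw [pvCover_append]

-- A's inner window loop: succeeds iff every position holds at least freq, and then just
-- subtracts freq at each (distinct) position.
lemma validgroupAWin_eq (freq : Int) (xs : List Int) (hnd : xs.Nodup)
    (d : PySem.Dict Int Int) :
    validgroupAWin freq xs d =
      if ∀ i ∈ xs, freq ≤ d.getD i 0 then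
        some (xs.foldl (fun d i => d.modify i 0 (fun x => x - freq)) d)
      else none := by
  induction xs generalizing d with
  | nil => simp [validgroupAWin]
  | cons x t ih =>
      have hx : x ∉ t := (List.nodup_cons.mp hnd).1
      have hnd' : t.Nodup := (List.nodup_cons.mp hnd).2
      simp only [validgroupAWin]
      by_cases hlt : d.getD x 0 < freq
      · rw [if_pos hlt]
        have : ¬ ∀ i ∈ x :: t, freq ≤ d.getD i 0 := by
          intro h; exact absurd (h x (by simp)) (by omega)
        rw [if_neg this]
      · rw [if_neg hlt, ih hnd']
        have hgd : ∀ i ∈ t, (d.modify x 0 (fun y => y - freq)).getD i 0 = d.getD i 0 := by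
          intro i hi
          rw [PySem.Dict.getD_modify]
          have : i ≠ x := fun h => hx (h ▸ hi)
          simp [this]
        have hcond : (∀ i ∈ t, freq ≤ (d.modify x 0 (fun y => y - freq)).getD i 0)
            ↔ (∀ i ∈ x :: t, freq ≤ d.getD i 0) := by
          constructor
          · intro h i hi
            rcases List.mem_cons.mp hi with rfl | hi'
            · omega
            · rw [← hgd i hi']; exact h i hi'
          · intro h i hi
            rw [hgd i hi]; exact h i (by simp [hi])
        by_cases hall : ∀ i ∈ x :: t, freq ≤ d.getD i 0
        · rw [if_pos (hcond.mpr hall), if_pos hall]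
          rfl
        · rw [if_neg (fun h => hall (hcond.mp h)), if_neg hall]

lemma getD_subFold (freq : Int) (xs : List Int) (hnd : xs.Nodup) (d : PySem.Dict Int Int)
    (v : Int) :
    (xs.foldl (fun d i => d.modify i 0 (fun x => x - freq)) d).getD v 0
      = d.getD v 0 - (if v ∈ xs then freq else 0) := by
  induction xs generalizing d with
  | nil => simp
  | cons x t ih =>
      have hx : x ∉ t := (List.nodup_cons.mp hnd).1
      have hnd' : t.Nodup := (List.nodup_cons.mp hnd).2
      simp only [List.foldl_cons]
      rw [ih hnd']
      rw [PySem.Dict.getD_modify]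
      by_cases hv : v = x
      · subst hv
        have : v ∉ t := hx
        simp [this]
      · simp only [if_neg hv, List.mem_cons]
        by_cases hvt : v ∈ t <;> simp [hvt, hv]

-- If B's state already records more open sequences across some future value than that value's
-- count, B ends in False.
lemma deficient_loop (k : Int) (cnt : PySem.Dict Int Int)
    (hc0 : ∀ v, 0 ≤ cnt.getD v 0) :
    ∀ (ks : List Int) (opened last : Int) (starts : List Int),
      opened = starts.sum → (∀ x ∈ starts, 0 ≤ x) → (starts.length : Int) < k →
      ks.Pairwise (· < ·) → (∀ v ∈ ks, last < v) →
      (∀ v, last < v → (0 < cnt.getD v 0 ↔ v ∈ ks)) →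
      (∃ i, last < i ∧ cnt.getD i 0 < pvCover k last starts i) →
      validgroupBLoop k cnt ks opened last starts = false := by
  intro ks
  induction ks with
  | nil =>
      intro opened last starts hsum hent hlen _ _ _ hdef
      obtain ⟨i, hi, hdi⟩ := hdef
      have h1 := pvCover_le_sum k last starts hent i
      have h2 := hc0 i
      have hop : opened ≠ 0 := by omega
      simp [validgroupBLoop, hop]
  | cons num rest ih =>
      intro opened last starts hsum hent hlen hpw hgt hkeys hdef
      obtain ⟨i0, hi0, hdi0⟩ := hdef
      have hsum_nonneg : 0 ≤ starts.sum := List.sum_nonneg hent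
      have hop : 0 < opened := by
        rcases lt_or_eq_of_le (hsum ▸ hsum_nonneg) with h | h
        · exact h
        · exfalso
          have h1 := pvCover_le_sum k last starts hent i0
          have h2 := hc0 i0
          omega
      by_cases hnum : num = last + 1
      · -- the step succeeds or fails on the count test; either way we are done
        have hlenle : (starts.length : Int) ≤ k - 1 := by omega
        have hcov_num : pvCover k last starts num = starts.sum :=
          pvCover_eq_sum k last starts num (by omega)
        have hg1 : (decide (opened > 0) && (num != last + 1)) = false := by
          subst hnum; simp
        by_cases hlt : cnt.getD num 0 < opened
        · simp [validgroupBLoop, hg1, hlt]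
        · have hzb : starts.sum ≠ 0 := by omega
          have hopb : (opened == 0) = false := by simp; omega
          have hi0num : num < i0 := by
            rcases lt_trichotomy i0 num with h | h | h
            · omega
            · exfalso; rw [h, hcov_num] at hdi0; omega
            · exact h
          have hs0 : 0 ≤ cnt.getD num 0 - opened := by omega
          have hstep := pvCover_step k last num (cnt.getD num 0 - opened) starts hent hlen
            (Or.inl hnum) i0 hi0num
          have hzbb : (starts.sum == 0) = false := beq_eq_false_iff_ne.mpr hzb
          simp only [hzbb, Bool.false_eq_true, if_false] at hstep
          have hrest_pw : rest.Pairwise (· < ·) := (List.pairwise_cons.mp hpw).2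
          have hrest_gt : ∀ v ∈ rest, num < v := (List.pairwise_cons.mp hpw).1
          have hrest_keys : ∀ v, num < v → (0 < cnt.getD v 0 ↔ v ∈ rest) := by
            intro v hv
            have := hkeys v (by omega)
            rw [this, List.mem_cons]
            constructor
            · rintro (rfl | h)
              · omega
              · exact h
            · intro h; exact Or.inr h
          have hstarts_ne : starts ≠ [] := by
            intro h; rw [h] at hsum; simp at hsum; omega
          simp only [validgroupBLoop, hg1, Bool.false_eq_true, if_false, if_neg hlt,
            hopb]
          by_cases hpop : (((starts ++ [cnt.getD num 0 - opened]).length : Int) = k)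
          · have hb : (((starts ++ [cnt.getD num 0 - opened]).length : Int) == k) = true :=
              beq_iff_eq.mpr hpop
            simp only [hb, if_true] at hstep ⊢
            obtain ⟨s0, t, rfl⟩ : ∃ s0 t, starts = s0 :: t := by
              cases starts with
              | nil => exact absurd rfl hstarts_ne
              | cons a b => exact ⟨a, b, rfl⟩
            simp only [List.cons_append, List.headI, List.tail_cons] at hstep ⊢
            apply ih
            · simp only [List.sum_cons, List.sum_append, List.sum_cons,
                List.sum_nil] at hsum ⊢
              omega
            · intro x hx
              rcases List.mem_append.mp hx with h | h
              · exact hent x (List.mem_cons_of_mem s0 h)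
              · simp only [List.mem_singleton] at h
                omega
            · simp only [List.cons_append, List.length_cons, List.length_append,
                List.length_nil] at hpop ⊢
              push_cast at hpop ⊢; omega
            · exact hrest_pw
            · exact hrest_gt
            · exact hrest_keys
            · refine ⟨i0, hi0num, ?_⟩
              rw [hstep]
              have : 0 ≤ (if i0 < num + k then cnt.getD num 0 - opened else 0) := by
                split <;> omega
              omega
          · have hb : (((starts ++ [cnt.getD num 0 - opened]).length : Int) == k) = false :=
              beq_eq_false_iff_ne.mpr hpop
            simp only [hb, Bool.false_eq_true, if_false] at hstep ⊢
            apply ih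
            · simp only [List.sum_append, List.sum_cons, List.sum_nil]; omega
            · intro x hx
              rcases List.mem_append.mp hx with h | h
              · exact hent x h
              · simp only [List.mem_singleton] at h
                omega
            · simp only [List.length_append, List.length_cons, List.length_nil] at hpop ⊢
              push_cast at hpop ⊢; omega
            · exact hrest_pw
            · exact hrest_gt
            · exact hrest_keys
            · refine ⟨i0, hi0num, ?_⟩
              rw [hstep]
              have : 0 ≤ (if i0 < num + k then cnt.getD num 0 - opened else 0) := by
                split <;> omega
              omega
      · -- gap with open sequences: the loop returns False immediately
        have hg1 : (decide (opened > 0) && (num != last + 1)) = true := by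
          simp [hop, hnum]
        simp [validgroupBLoop, hg1]

-- Packaging of B's state update: the branch taken, the new state's well-formedness.
lemma bstep_props (k : Int) (cnt : PySem.Dict Int Int) (rest : List Int)
    (num c : Int) (starts : List Int)
    (hent : ∀ x ∈ starts, 0 ≤ x) (hlen : (starts.length : Int) < k)
    (hsle : starts.sum ≤ c) :
    (if ((((if starts.sum == 0 then ([] : List Int) else starts) ++ [c - starts.sum]).length : Int) == k) = true then
        validgroupBLoop k cnt rest
          (c - ((if starts.sum == 0 then ([] : List Int) else starts) ++ [c - starts.sum]).headI) num
          ((if starts.sum == 0 then ([] : List Int) else starts) ++ [c - starts.sum]).tail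
      else validgroupBLoop k cnt rest c num
        ((if starts.sum == 0 then ([] : List Int) else starts) ++ [c - starts.sum]))
      = validgroupBLoop k cnt rest
          (if ((((if starts.sum == 0 then ([] : List Int) else starts) ++ [c - starts.sum]).length : Int) == k) = true
           then c - ((if starts.sum == 0 then ([] : List Int) else starts) ++ [c - starts.sum]).headI else c)
          num
          (if ((((if starts.sum == 0 then ([] : List Int) else starts) ++ [c - starts.sum]).length : Int) == k) = true
           then ((if starts.sum == 0 then ([] : List Int) else starts) ++ [c - starts.sum]).tail
           else (if starts.sum == 0 then ([] : List Int) else starts) ++ [c - starts.sum])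
    ∧ (if ((((if starts.sum == 0 then ([] : List Int) else starts) ++ [c - starts.sum]).length : Int) == k) = true
       then c - ((if starts.sum == 0 then ([] : List Int) else starts) ++ [c - starts.sum]).headI else c)
        = (if ((((if starts.sum == 0 then ([] : List Int) else starts) ++ [c - starts.sum]).length : Int) == k) = true
           then ((if starts.sum == 0 then ([] : List Int) else starts) ++ [c - starts.sum]).tail
           else (if starts.sum == 0 then ([] : List Int) else starts) ++ [c - starts.sum]).sum
    ∧ (∀ x ∈ (if ((((if starts.sum == 0 then ([] : List Int) else starts) ++ [c - starts.sum]).length : Int) == k) = true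
           then ((if starts.sum == 0 then ([] : List Int) else starts) ++ [c - starts.sum]).tail
           else (if starts.sum == 0 then ([] : List Int) else starts) ++ [c - starts.sum]), 0 ≤ x)
    ∧ (((if ((((if starts.sum == 0 then ([] : List Int) else starts) ++ [c - starts.sum]).length : Int) == k) = true
           then ((if starts.sum == 0 then ([] : List Int) else starts) ++ [c - starts.sum]).tail
           else (if starts.sum == 0 then ([] : List Int) else starts) ++ [c - starts.sum]).length : Int) < k) := by
  have hent1 : ∀ x ∈ (if starts.sum == 0 then ([] : List Int) else starts) ++ [c - starts.sum], 0 ≤ x := by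
    intro x hx
    rcases List.mem_append.mp hx with h | h
    · split at h
      · simp at h
      · exact hent x h
    · simp only [List.mem_singleton] at h
      have := List.sum_nonneg hent
      omega
  have hlen1 : (((if starts.sum == 0 then ([] : List Int) else starts) ++ [c - starts.sum]).length : Int)
      ≤ (starts.length : Int) + 1 := by
    split <;> simp
  have hsum1 : ((if starts.sum == 0 then ([] : List Int) else starts) ++ [c - starts.sum]).sum = c := by
    by_cases hz : starts.sum = 0
    · simp [beq_iff_eq.mpr hz]
      omega
    · simp [beq_eq_false_iff_ne.mpr hz]
  by_cases hpop : ((((if starts.sum == 0 then ([] : List Int) else starts) ++ [c - starts.sum]).length : Int) = k)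
  · have hb := beq_iff_eq.mpr hpop
    refine ⟨by rw [hb]; simp, ?_, ?_, ?_⟩
    · rw [hb]
      simp only [if_true]
      obtain ⟨s0, t, he⟩ : ∃ s0 t,
          (if starts.sum == 0 then ([] : List Int) else starts) ++ [c - starts.sum] = s0 :: t := by
        cases hh : (if starts.sum == 0 then ([] : List Int) else starts) ++ [c - starts.sum] with
        | nil => simp at hh
        | cons a b => exact ⟨a, b, rfl⟩
      rw [he]
      rw [he] at hsum1
      simp only [List.headI, List.tail_cons, List.sum_cons] at hsum1 ⊢
      omega
    · rw [hb]
      simp only [if_true]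
      intro x hx
      exact hent1 x (List.mem_of_mem_tail hx)
    · rw [hb]
      simp only [if_true]
      rcases hq : (if starts.sum == 0 then ([] : List Int) else starts) ++ [c - starts.sum] with _ | ⟨a, b⟩
      · simp at hq
      · rw [hq] at hpop
        simp only [List.tail_cons, List.length_cons] at hpop ⊢
        push_cast at hpop ⊢
        omega
  · have hb := beq_eq_false_iff_ne.mpr hpop
    rw [hb]
    simp only [Bool.false_eq_true, if_false]
    exact ⟨by trivial, hsum1.symm, hent1, by omega⟩

-- Main simulation: while A has not failed, its counter is the original counts minus B's open
-- coverage, and the two loops return the same Boolean.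
lemma main_loop (k : Int) (cnt : PySem.Dict Int Int)
    (hc0 : ∀ v, 0 ≤ cnt.getD v 0) :
    ∀ (ks : List Int) (d : PySem.Dict Int Int) (opened last lo : Int) (starts : List Int),
      opened = starts.sum → (∀ x ∈ starts, 0 ≤ x) → (starts.length : Int) < k →
      (starts ≠ [] → last = lo - 1) →
      (∀ i, lo ≤ i → d.getD i 0 = cnt.getD i 0 - pvCover k last starts i) →
      (∀ i, lo ≤ i → 0 ≤ d.getD i 0) →
      ks.Pairwise (· < ·) → (∀ v, lo ≤ v → (0 < cnt.getD v 0 ↔ v ∈ ks)) →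
      (∀ v ∈ ks, lo ≤ v) →
      validgroupALoop k ks d = validgroupBLoop k cnt ks opened last starts := by
  intro ks
  induction ks with
  | nil =>
      intro d opened last lo starts hsum hent hlen hlast hdval hdpos _ hkeys _
      have hop : opened = 0 := by
        rcases List.eq_nil_or_concat starts with h | _
        · rw [h] at hsum; simpa using hsum
        case inr hne =>
        have hne' : starts ≠ [] := by
          obtain ⟨a, b, rfl⟩ := hne; simp
        have hl := hlast hne'
        have h1 := hdpos lo le_rfl
        have h2 := hdval lo le_rfl
        have hcov : pvCover k last starts lo = starts.sum :=
          pvCover_eq_sum k last starts lo (by omega)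
        have hclo : ¬ 0 < cnt.getD lo 0 := by
          rw [hkeys lo le_rfl]; simp
        have := hc0 lo
        have hsn := List.sum_nonneg hent
        omega
      simp [validgroupALoop, validgroupBLoop, hop]
  | cons num rest ih =>
      intro d opened last lo starts hsum hent hlen hlast hdval hdpos hpw hkeys hmemlo
      subst hsum
      have hlonum : lo ≤ num := hmemlo num (by simp)
      have hsum_nonneg : 0 ≤ starts.sum := List.sum_nonneg hent
      have hrest_pw : rest.Pairwise (· < ·) := (List.pairwise_cons.mp hpw).2
      have hrest_gt : ∀ v ∈ rest, num < v := (List.pairwise_cons.mp hpw).1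
      have hkey : pvCover k last starts num = starts.sum ∧ (num = last + 1 ∨ starts.sum = 0) := by
        by_cases hz : starts.sum = 0
        · have h1 := pvCover_nonneg k last starts hent num
          have h2 := pvCover_le_sum k last starts hent num
          exact ⟨by omega, Or.inr hz⟩
        · have hne : starts ≠ [] := by
            intro h; rw [h] at hz; simp at hz
          have hl := hlast hne
          have hnum : num = last + 1 := by
            by_contra hgt'
            have hlolt : lo < num := by omega
            have h1 := hdpos lo le_rfl
            have h2 := hdval lo le_rfl
            have hcov : pvCover k last starts lo = starts.sum :=
              pvCover_eq_sum k last starts lo (by omega)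
            have hclo : ¬ 0 < cnt.getD lo 0 := by
              rw [hkeys lo le_rfl, List.mem_cons]
              push Not
              refine ⟨by omega, fun hmem => ?_⟩
              have := hrest_gt lo hmem
              omega
            have := hc0 lo
            omega
          exact ⟨by rw [hnum]; exact pvCover_eq_sum k last starts (last + 1) (by omega),
            Or.inl hnum⟩
      have hfreq : d.getD num 0 = cnt.getD num 0 - starts.sum := by
        rw [hdval num hlonum, hkey.1]
      have hfreq0 : 0 ≤ d.getD num 0 := hdpos num hlonum
      have hg1 : (decide (starts.sum > 0) && (num != last + 1)) = false := by
        rcases hkey.2 with h | h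
        · subst h; simp
        · rw [h]; simp
      have hg2 : ¬ cnt.getD num 0 < starts.sum := by omega
      have hrest_keys : ∀ v, num + 1 ≤ v → (0 < cnt.getD v 0 ↔ v ∈ rest) := by
        intro v hv
        rw [hkeys v (by omega), List.mem_cons]
        constructor
        · rintro (rfl | h)
          · omega
          · exact h
        · intro h; exact Or.inr h
      obtain ⟨hE, hsum', hent', hlen'⟩ :=
        bstep_props k cnt rest num (cnt.getD num 0) starts hent hlen (by omega)
      have hcov' := pvCover_step k last num (cnt.getD num 0 - starts.sum) starts hent hlen
        hkey.2
      simp only [] at hcov'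
      simp only [validgroupALoop, validgroupBLoop, hg1, Bool.false_eq_true, if_false,
        if_neg hg2]
      rw [hE]
      by_cases hfpos : 0 < d.getD num 0
      · rw [if_pos hfpos]
        rw [validgroupAWin_eq _ _ (PySem.List.nodup_pyRange_one num (num + k)) d]
        by_cases hall : ∀ i ∈ PySem.List.pyRange num (num + k) 1, d.getD num 0 ≤ d.getD i 0
        · rw [if_pos hall]
          apply ih _ _ num (num + 1)
          · exact hsum'
          · exact hent'
          · exact hlen'
          · intro _; omega
          · intro i hi
            rw [getD_subFold _ _ (PySem.List.nodup_pyRange_one num (num + k)) d i,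
              hdval i (by omega), hcov' i (by omega)]
            have hmem : i ∈ PySem.List.pyRange num (num + k) 1 ↔ num ≤ i ∧ i < num + k :=
              PySem.List.mem_pyRange_one
            by_cases hw : i < num + k
            · rw [if_pos (hmem.mpr ⟨by omega, hw⟩), if_pos hw]
              omega
            · rw [if_neg (fun hh => hw (hmem.mp hh).2), if_neg hw]
              omega
          · intro i hi
            rw [getD_subFold _ _ (PySem.List.nodup_pyRange_one num (num + k)) d i]
            by_cases hw : i ∈ PySem.List.pyRange num (num + k) 1
            · have := hall i hw
              rw [if_pos hw]
              omega
            · rw [if_neg hw]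
              have := hdpos i (by omega)
              omega
          · exact hrest_pw
          · exact hrest_keys
          · intro v hv
            have := hrest_gt v hv
            omega
        · rw [if_neg hall]
          push Not at hall
          obtain ⟨i0, hi0mem, hi0lt⟩ := hall
          have hi0rng := PySem.List.mem_pyRange_one.mp hi0mem
          have hi0num : num < i0 := by
            rcases eq_or_lt_of_le hi0rng.1 with h | h
            · exfalso; rw [← h] at hi0lt; omega
            · exact h
          symm
          apply deficient_loop k cnt hc0 rest _ num _ hsum' hent' hlen' hrest_pw
            hrest_gt (fun v hv => hrest_keys v (by omega))
          refine ⟨i0, hi0num, ?_⟩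
          rw [hcov' i0 hi0num, if_pos hi0rng.2]
          have := hdval i0 (by omega)
          omega
      · rw [if_neg hfpos]
        apply ih _ _ num (num + 1)
        · exact hsum'
        · exact hent'
        · exact hlen'
        · intro _; omega
        · intro i hi
          rw [hdval i (by omega), hcov' i (by omega)]
          have : (if i < num + k then cnt.getD num 0 - starts.sum else 0) = 0 := by
            split <;> omega
          rw [this]
          ring
        · intro i hi
          exact hdpos i (by omega)
        · exact hrest_pw
        · exact hrest_keys
        · intro v hv
          have := hrest_gt v hv
          omega

lemma aLoop_nonpos (k : Int) (hk : k ≤ 0) :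
    ∀ (ks : List Int) (d : PySem.Dict Int Int), validgroupALoop k ks d = true := by
  intro ks
  induction ks with
  | nil => intro d; rfl
  | cons num rest ih =>
      intro d
      have hr : PySem.List.pyRange num (num + k) 1 = [] :=
        PySem.List.pyRange_one_eq_nil (by omega)
      simp only [validgroupALoop, hr, validgroupAWin]
      split
      · exact ih _
      · exact ih _

lemma bLoop_neg (k : Int) (hk : k < 0) (cnt : PySem.Dict Int Int) :
    ∀ (ks : List Int), ks ≠ [] → (∀ v ∈ ks, 0 < cnt.getD v 0) →
      ∀ (opened last : Int) (starts : List Int),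
        validgroupBLoop k cnt ks opened last starts = false := by
  intro ks
  induction ks with
  | nil => intro h; exact absurd rfl h
  | cons num rest ih =>
      intro _ hpos opened last starts
      have hpopf : ((((if opened == 0 then ([] : List Int) else starts)
          ++ [cnt.getD num 0 - opened]).length : Int) == k) = false := by
        apply beq_eq_false_iff_ne.mpr
        have h0 : (0 : Int) ≤ (((if opened == 0 then ([] : List Int) else starts)
            ++ [cnt.getD num 0 - opened]).length : Int) := Int.natCast_nonneg _
        omega
      simp only [validgroupBLoop, hpopf, Bool.false_eq_true, if_false]
      split
      · rfl
      · split
        · rfl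
        · cases rest with
          | nil =>
              have := hpos num (by simp)
              simp only [validgroupBLoop]
              simp
              omega
          | cons b bs =>
              exact ih (by simp) (fun v hv => hpos v (List.mem_cons_of_mem num hv)) _ _ _

-- ===== VERDICT (by name: the statement is the Claim_ definition above) =====
theorem validgroup_spec : Claim_unchanged_validgroup := by
  unfold Claim_unchanged_validgroup
  intro arr k hdom hpre
  unfold Spec_validgroup
  intro hnd
  by_cases hm : PySem.Int.mod (arr.length : Int) k = 0
  · rcases lt_trichotomy k 0 with hk | hk | hk
    · have harr : arr = [] := by
        by_contra h
        exact hnd ⟨hk, h, hm⟩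
      subst harr
      simp only [validgroup, validgroup_alt, List.length_nil]
      split
      · rfl
      · rfl
    · exact absurd hk hpre
    · have hc0 : ∀ v, 0 ≤ (PySem.Dict.counter arr).getD v 0 := by
        intro v
        rw [PySem.Dict.getD_counter]
        exact Int.natCast_nonneg _
      have hbound : ∀ v ∈ arr, (-2147483649 : Int) ≤ v := by
        intro v hv
        unfold Dom_validgroup at hdom
        simp only [Bool.and_eq_true, List.all_eq_true] at hdom
        have := hdom.1 v hv
        unfold pvDomInt at this
        simp only [decide_eq_true_eq] at this
        omega
      have hmemks : ∀ v, v ∈ PySem.List.sorted (PySem.Dict.counter arr).keys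
          (fun x => x) false ↔ v ∈ arr := by
        intro v
        rw [PySem.List.mem_sorted, PySem.Dict.keys_counter, PySem.Set.mem_ofList]
      simp only [validgroup, validgroup_alt, hm, ne_eq, not_true_eq_false, if_false]
      apply main_loop k (PySem.Dict.counter arr) hc0 _ _ 0 0 (-2147483649) []
      · rfl
      · intro x hx; simp at hx
      · simpa using hk
      · intro h; exact absurd rfl h
      · intro i _; simp [pvCover]
      · intro i _; exact hc0 i
      · rw [PySem.Dict.keys_counter]
        exact PySem.List.sorted_ofList_pairwise_lt arr
      · intro v _
        rw [hmemks v, PySem.Dict.getD_counter]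
        exact_mod_cast List.count_pos_iff
      · intro v hv
        exact hbound v ((hmemks v).mp hv)
  · simp [validgroup, validgroup_alt, hm]

theorem validgroup_changed : Claim_changed_validgroup := by
  unfold Claim_changed_validgroup; decide

theorem validgroup_tight : Claim_exact_validgroup := by
  unfold Claim_exact_validgroup
  intro arr k _ _ hd
  obtain ⟨hk, hne, hm⟩ := hd
  have hA : validgroup arr k = true := by
    unfold validgroup
    rw [if_neg (by simp [hm])]
    exact aLoop_nonpos k (le_of_lt hk) _ _
  have hB : validgroup_alt arr k = false := by
    unfold validgroup_alt
    rw [if_neg (by simp [hm])]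
    apply bLoop_neg k hk
    · obtain ⟨x, hx⟩ := List.exists_mem_of_ne_nil arr hne
      intro hnil
      have : x ∈ PySem.List.sorted (PySem.Dict.counter arr).keys (fun x => x) false := by
        rw [PySem.List.mem_sorted, PySem.Dict.keys_counter, PySem.Set.mem_ofList]
        exact hx
      rw [hnil] at this
      simp at this
    · intro v hv
      rw [PySem.List.mem_sorted, PySem.Dict.keys_counter, PySem.Set.mem_ofList] at hv
      rw [PySem.Dict.getD_counter]
      exact_mod_cast List.count_pos_iff.mpr hv
  rw [hA, hB]
  simp
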